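-- pv_equiv track=rewrite | github.com/NILodio/dota2Analytics | src/data/open_dota.py | add_picks_bans_data
-- ===== SOURCE A (Python) =====
-- def add_picks_bans_data(match, picks_bans):
--
--     if picks_bans is None or len(picks_bans) < 24:
--         for i in range(1, 6):
--             match["team1_hero" + str(i)] = None
--         for i in range(1, 6):
--             match["team2_hero" + str(i)] = None
--         for i in range(1, 8):
--             match["team1_ban" + str(i)] = None
--         for i in range(1, 8):
--             match["team2_ban" + str(i)] = None
--         return match
--
--     count_picks_team1 = 0
--     count_picks_team2 = 0
--     count_bans_team1 = 0
--     count_bans_team2 = 0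
--     for pb in picks_bans: # pb is a dictionary with following fields: {'is_pick': False, 'hero_id': 66, 'team': 0/1, 'order': 0}
--
--         if pb['is_pick'] and pb['team'] == 0: # pick from team 1
--             count_picks_team1 += 1
--             column_name = "team1_hero" + str(count_picks_team1)
--             match[column_name] = pb['hero_id']
--             continue
--
--         elif pb['is_pick'] and pb['team'] == 1: # pick from team 2
--             count_picks_team2 += 1
--             column_name = "team2_hero" + str(count_picks_team2)
--             match[column_name] = pb['hero_id']
--             continue
--
--         elif not pb['is_pick'] and pb['team'] == 0: # ban from team 1
--             count_bans_team1 += 1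
--             column_name = "team1_ban" + str(count_bans_team1)
--             match[column_name] = pb['hero_id']
--             continue
--
--         elif not pb['is_pick'] and pb['team'] == 1: # ban from team 2
--             count_bans_team2 += 1
--             column_name = "team2_ban" + str(count_bans_team2)
--             match[column_name] = pb['hero_id']
--             continue
--
--     return match
-- ===== SOURCE B (Python) =====
-- def add_picks_bans_data(match, picks_bans):
--     if picks_bans is None or len(picks_bans) < 24:
--         for prefix, n in (("team1_hero", 5), ("team2_hero", 5),
--                           ("team1_ban", 7), ("team2_ban", 7)):
--             for i in range(1, n + 1):
--                 match[prefix + str(i)] = None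
--         return match
--
--     # stateless recount: no counters carried across the loop; each entry's slot
--     # number is recomputed as the count of same-group entries up to and including it
--     for j, pb in enumerate(picks_bans):
--         team = pb['team']
--         if team == 0 or team == 1:
--             pick = bool(pb['is_pick'])
--             if pick:
--                 prefix = "team1_hero" if team == 0 else "team2_hero"
--             else:
--                 prefix = "team1_ban" if team == 0 else "team2_ban"
--             rank = sum(1 for q in picks_bans[:j + 1]
--                        if bool(q['is_pick']) == pick and q['team'] == team)
--             match[prefix + str(rank)] = pb['hero_id']
--     return match
-- ===== Notes on version B (the rewrite author's own statement) =====
-- stated objective: alternative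
-- what changed: A's stateful single pass with four named counters and a four-way if/elif chain is replaced by a stateless design: for each entry the slot number is recomputed by counting same-group entries in the prefix picks_bans[:j+1], so no counters are carried across the loop and the branch chain collapses to a prefix lookup.
import Mathlib
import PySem

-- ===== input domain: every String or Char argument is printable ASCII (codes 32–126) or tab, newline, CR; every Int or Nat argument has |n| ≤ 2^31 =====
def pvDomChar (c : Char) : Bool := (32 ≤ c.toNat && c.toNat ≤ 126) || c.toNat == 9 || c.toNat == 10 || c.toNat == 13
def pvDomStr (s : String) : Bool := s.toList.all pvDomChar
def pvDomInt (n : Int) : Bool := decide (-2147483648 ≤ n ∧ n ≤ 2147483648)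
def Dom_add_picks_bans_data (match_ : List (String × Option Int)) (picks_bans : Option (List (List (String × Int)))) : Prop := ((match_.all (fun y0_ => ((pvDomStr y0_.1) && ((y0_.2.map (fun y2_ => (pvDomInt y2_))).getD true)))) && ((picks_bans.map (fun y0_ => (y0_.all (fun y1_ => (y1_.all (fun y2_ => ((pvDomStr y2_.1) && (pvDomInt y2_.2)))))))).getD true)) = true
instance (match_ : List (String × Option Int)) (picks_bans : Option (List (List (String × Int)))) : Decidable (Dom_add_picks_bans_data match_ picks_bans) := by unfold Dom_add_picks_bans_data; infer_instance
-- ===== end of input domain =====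

-- B replaces A's stateful single pass (four named counters + four-way if/elif chain) by a
-- stateless recount: each entry's slot number is recomputed as the count of same-group entries
-- in the prefix picks_bans[:j+1]; objective: alternative decomposition (O(n^2), not faster).
-- Python A and B both mutate `match` in place identically; the equivalence proved here is about
-- the returned dict (which is that same object in both).


-- ===== PORT A =====
-- shared trivial helper: pb['k'] as an Option (none = KeyError, excluded by Pre_)
def pbGet (pb : List (String × Int)) (k : String) : Option Int :=
  PySem.Dict.get? (PySem.Dict.mk pb) k

-- A's guard branch: four range loops assigning None
def aGuard (m : PySem.Dict String (Option Int)) : PySem.Dict String (Option Int) :=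
  let m1 := (PySem.List.pyRange 1 6 1).foldl (fun d i => d.insert ("team1_hero" ++ PySem.Int.toStr i) none) m
  let m2 := (PySem.List.pyRange 1 6 1).foldl (fun d i => d.insert ("team2_hero" ++ PySem.Int.toStr i) none) m1
  let m3 := (PySem.List.pyRange 1 8 1).foldl (fun d i => d.insert ("team1_ban" ++ PySem.Int.toStr i) none) m2
  (PySem.List.pyRange 1 8 1).foldl (fun d i => d.insert ("team2_ban" ++ PySem.Int.toStr i) none) m3

-- the main for-loop of A, carrying the four counters.  `match[col] = pb['hero_id']` is ported as
-- inserting `pbGet pb "hero_id"` (= some h; none only where Python raises KeyError, outside Pre_);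
-- a pb missing 'is_pick'/'team' (Python KeyError, outside Pre_) leaves the state unchanged.
def aLoop (m : PySem.Dict String (Option Int)) (c1 c2 c3 c4 : Int) :
    List (List (String × Int)) → PySem.Dict String (Option Int)
  | [] => m
  | pb :: rest =>
    match pbGet pb "is_pick", pbGet pb "team" with
    | some ip, some tm =>
      if ip ≠ 0 ∧ tm = 0 then
        aLoop (m.insert ("team1_hero" ++ PySem.Int.toStr (c1 + 1)) (pbGet pb "hero_id")) (c1 + 1) c2 c3 c4 rest
      else if ip ≠ 0 ∧ tm = 1 then
        aLoop (m.insert ("team2_hero" ++ PySem.Int.toStr (c2 + 1)) (pbGet pb "hero_id")) c1 (c2 + 1) c3 c4 rest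
      else if ip = 0 ∧ tm = 0 then
        aLoop (m.insert ("team1_ban" ++ PySem.Int.toStr (c3 + 1)) (pbGet pb "hero_id")) c1 c2 (c3 + 1) c4 rest
      else if ip = 0 ∧ tm = 1 then
        aLoop (m.insert ("team2_ban" ++ PySem.Int.toStr (c4 + 1)) (pbGet pb "hero_id")) c1 c2 c3 (c4 + 1) rest
      else aLoop m c1 c2 c3 c4 rest
    | _, _ => aLoop m c1 c2 c3 c4 rest

def add_picks_bans_data (match_ : List (String × Option Int)) (picks_bans : Option (List (List (String × Int)))) : List (String × Option Int) :=
  match picks_bans with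
  | none => (aGuard (PySem.Dict.mk match_)).items
  | some pbs =>
    if pbs.length < 24 then (aGuard (PySem.Dict.mk match_)).items
    else (aLoop (PySem.Dict.mk match_) 0 0 0 0 pbs).items

-- ===== PORT B =====
-- B's guard branch: one nested loop over the (prefix, count) table
def bGuard (m : PySem.Dict String (Option Int)) : PySem.Dict String (Option Int) :=
  [("team1_hero", (5 : Int)), ("team2_hero", 5), ("team1_ban", 7), ("team2_ban", 7)].foldl
    (fun d pn => (PySem.List.pyRange 1 (pn.2 + 1) 1).foldl
      (fun d' i => d'.insert (pn.1 ++ PySem.Int.toStr i) none) d) m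

-- the comprehension predicate: bool(q['is_pick']) == pick and q['team'] == team
-- (getD defaults are never read inside Pre_, where both keys are present)
def bMatches (pick : Bool) (tm : Int) (q : List (String × Int)) : Bool :=
  (((pbGet q "is_pick").getD 0 != 0) == pick) && ((pbGet q "team").getD 2 == tm)

def bPrefix (pick : Bool) (tm : Int) : String :=
  if pick then (if tm = 0 then "team1_hero" else "team2_hero")
  else (if tm = 0 then "team1_ban" else "team2_ban")

-- B's loop over enumerate(picks_bans): j is the enumerate index; the slot number `rank`
-- is recounted from the prefix picks_bans[:j+1] (ported as List.take, exact since j+1 ≥ 0)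
def bLoop (pbs : List (List (String × Int))) : Nat → List (List (String × Int)) → PySem.Dict String (Option Int) → PySem.Dict String (Option Int)
  | _, [], m => m
  | j, pb :: rest, m =>
    match pbGet pb "team" with
    | some tm =>
      if tm = 0 ∨ tm = 1 then
        let pick := (pbGet pb "is_pick").getD 0 != 0
        let rank : Int := ((pbs.take (j + 1)).countP (bMatches pick tm) : Int)
        bLoop pbs (j + 1) rest (m.insert (bPrefix pick tm ++ PySem.Int.toStr rank) (pbGet pb "hero_id"))
      else bLoop pbs (j + 1) rest m
    | none => bLoop pbs (j + 1) rest m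

def add_picks_bans_data_alt (match_ : List (String × Option Int)) (picks_bans : Option (List (List (String × Int)))) : List (String × Option Int) :=
  match picks_bans with
  | none => (bGuard (PySem.Dict.mk match_)).items
  | some pbs =>
    if pbs.length < 24 then (bGuard (PySem.Dict.mk match_)).items
    else (bLoop pbs 0 pbs (PySem.Dict.mk match_)).items

-- ===== PRECONDITION & SPEC =====
-- Pre_ excludes only inputs on which the Python A raises KeyError: in the non-guard case every
-- entry must have 'is_pick' and 'team', and 'hero_id' whenever team is 0 or 1 (a branch fires).
def Pre_add_picks_bans_data (match_ : List (String × Option Int)) (picks_bans : Option (List (List (String × Int)))) : Prop :=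
  (picks_bans.getD []).length < 24 ∨
  ∀ pb ∈ picks_bans.getD [],
    (pbGet pb "is_pick").isSome = true ∧ (pbGet pb "team").isSome = true ∧
    ((pbGet pb "team" = some 0 ∨ pbGet pb "team" = some 1) → (pbGet pb "hero_id").isSome = true)
instance (match_ : List (String × Option Int)) (picks_bans : Option (List (List (String × Int)))) : Decidable (Pre_add_picks_bans_data match_ picks_bans) := by unfold Pre_add_picks_bans_data; infer_instance

def pvWitness_add_picks_bans_data : (List (String × Option Int)) × (Option (List (List (String × Int)))) :=
  ([("score", some 3)], none)

def Spec_add_picks_bans_data (match_ : List (String × Option Int)) (picks_bans : Option (List (List (String × Int)))) (out : List (String × Option Int)) : Prop := out = add_picks_bans_data_alt match_ picks_bans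
instance (match_ : List (String × Option Int)) (picks_bans : Option (List (List (String × Int)))) (out : List (String × Option Int)) : Decidable (Spec_add_picks_bans_data match_ picks_bans out) := by unfold Spec_add_picks_bans_data; infer_instance

-- ===== CLAIM (what is proved, stated in full; the proofs are below) =====
def Claim_equal_add_picks_bans_data : Prop := ∀ (match_ : List (String × Option Int)) (picks_bans : Option (List (List (String × Int)))), Dom_add_picks_bans_data match_ picks_bans → Pre_add_picks_bans_data match_ picks_bans → Spec_add_picks_bans_data match_ picks_bans (add_picks_bans_data match_ picks_bans)

-- ===== LEMMAS AND PROOFS =====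

set_option maxRecDepth 4096

-- the two guard branches perform the same chain of 24 inserts
lemma guard_eq (m : PySem.Dict String (Option Int)) : aGuard m = bGuard m := by
  have h6 : PySem.List.pyRange 1 6 1 = [1, 2, 3, 4, 5] := by decide
  have h6' : PySem.List.pyRange 1 ((5 : Int) + 1) 1 = [1, 2, 3, 4, 5] := by decide
  have h8 : PySem.List.pyRange 1 8 1 = [1, 2, 3, 4, 5, 6, 7] := by decide
  have h8' : PySem.List.pyRange 1 ((7 : Int) + 1) 1 = [1, 2, 3, 4, 5, 6, 7] := by decide
  simp only [aGuard, bGuard, List.foldl_cons, List.foldl_nil, h6, h6', h8, h8']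

-- invariant: A's counters equal the counts of matching entries among the already-processed
-- prefix `done`, which is exactly what B's recount over picks_bans[:j+1] recomputes.
lemma loop_eq (rest : List (List (String × Int))) :
    ∀ (done : List (List (String × Int))) (m : PySem.Dict String (Option Int)),
    (∀ pb ∈ rest, (pbGet pb "is_pick").isSome = true ∧ (pbGet pb "team").isSome = true) →
    aLoop m (done.countP (bMatches true 0) : Int) (done.countP (bMatches true 1) : Int)
            (done.countP (bMatches false 0) : Int) (done.countP (bMatches false 1) : Int) rest
      = bLoop (done ++ rest) done.length rest m := by
  induction rest with
  | nil => intro done m _; simp [aLoop, bLoop]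
  | cons pb rest ih =>
    intro done m hkeys
    obtain ⟨hip', htm'⟩ := hkeys pb (by simp)
    have hrest : ∀ q ∈ rest, (pbGet q "is_pick").isSome = true ∧ (pbGet q "team").isSome = true :=
      fun q hq => hkeys q (by simp [hq])
    obtain ⟨ip, h1⟩ := Option.isSome_iff_exists.mp hip'
    obtain ⟨tm, h2⟩ := Option.isSome_iff_exists.mp htm'
    have htake : (done ++ pb :: rest).take (done.length + 1) = done ++ [pb] := by
      rw [show done ++ pb :: rest = (done ++ [pb]) ++ rest by simp]
      exact List.take_left' (by simp)
    have happ : (done ++ [pb]) ++ rest = done ++ pb :: rest := by simp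
    have hlen : (done ++ [pb]).length = done.length + 1 := by simp
    have keep : ∀ (p : Bool) (t : Int), bMatches p t pb = false →
        (done ++ [pb]).countP (bMatches p t) = done.countP (bMatches p t) := by
      intro p t hf; rw [List.countP_append]; simp [hf]
    simp only [aLoop, bLoop, h1, h2]
    by_cases ht0 : tm = 0
    · subst ht0
      rw [if_pos (Or.inl rfl)]
      by_cases hip : ip = 0
      · subst hip
        rw [if_neg (by simp), if_neg (by simp), if_pos ⟨rfl, rfl⟩]
        have hb : (((0 : Int)) != 0) = false := by decide
        have hm : bMatches false 0 pb = true := by simp [bMatches, h1, h2]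
        have hpfx : bPrefix false 0 = "team1_ban" := rfl
        simp only [Option.getD_some, hb, htake, hpfx, List.countP_append, List.countP_cons,
          List.countP_nil, hm]
        have := ih (done ++ [pb])
          (m.insert ("team1_ban" ++ PySem.Int.toStr ((done.countP (bMatches false 0) : Int) + 1))
            (pbGet pb "hero_id")) hrest
        rw [keep true 0 (by simp [bMatches, h1, h2]), keep true 1 (by simp [bMatches, h1, h2]),
            keep false 1 (by simp [bMatches, h1, h2]), happ, hlen] at this
        rw [List.countP_append] at this
        simp only [List.countP_cons, List.countP_nil, hm] at this
        push_cast at this ⊢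
        exact this
      · rw [if_pos ⟨hip, rfl⟩]
        have hb : (ip != 0) = true := by simp [hip]
        have hm : bMatches true 0 pb = true := by simp [bMatches, h1, h2, hip]
        have hpfx : bPrefix true 0 = "team1_hero" := rfl
        simp only [Option.getD_some, hb, htake, hpfx, List.countP_append, List.countP_cons,
          List.countP_nil, hm]
        have := ih (done ++ [pb])
          (m.insert ("team1_hero" ++ PySem.Int.toStr ((done.countP (bMatches true 0) : Int) + 1))
            (pbGet pb "hero_id")) hrest
        rw [keep true 1 (by simp [bMatches, h1, h2]), keep false 0 (by simp [bMatches, h1, h2, hip]),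
            keep false 1 (by simp [bMatches, h1, h2]), happ, hlen] at this
        rw [List.countP_append] at this
        simp only [List.countP_cons, List.countP_nil, hm] at this
        push_cast at this ⊢
        exact this
    · by_cases ht1 : tm = 1
      · subst ht1
        rw [if_pos (Or.inr rfl)]
        by_cases hip : ip = 0
        · subst hip
          rw [if_neg (by simp), if_neg (by simp), if_neg (by simp), if_pos ⟨rfl, rfl⟩]
          have hb : (((0 : Int)) != 0) = false := by decide
          have hm : bMatches false 1 pb = true := by simp [bMatches, h1, h2]
          have hpfx : bPrefix false 1 = "team2_ban" := rfl
          simp only [Option.getD_some, hb, htake, hpfx, List.countP_append, List.countP_cons,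
            List.countP_nil, hm]
          have := ih (done ++ [pb])
            (m.insert ("team2_ban" ++ PySem.Int.toStr ((done.countP (bMatches false 1) : Int) + 1))
              (pbGet pb "hero_id")) hrest
          rw [keep true 0 (by simp [bMatches, h1, h2]), keep true 1 (by simp [bMatches, h1, h2]),
              keep false 0 (by simp [bMatches, h1, h2]), happ, hlen] at this
          rw [List.countP_append] at this
          simp only [List.countP_cons, List.countP_nil, hm] at this
          push_cast at this ⊢
          exact this
        · rw [if_neg (by simp), if_pos ⟨hip, rfl⟩]
          have hb : (ip != 0) = true := by simp [hip]
          have hm : bMatches true 1 pb = true := by simp [bMatches, h1, h2, hip]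
          have hpfx : bPrefix true 1 = "team2_hero" := rfl
          simp only [Option.getD_some, hb, htake, hpfx, List.countP_append, List.countP_cons,
            List.countP_nil, hm]
          have := ih (done ++ [pb])
            (m.insert ("team2_hero" ++ PySem.Int.toStr ((done.countP (bMatches true 1) : Int) + 1))
              (pbGet pb "hero_id")) hrest
          rw [keep true 0 (by simp [bMatches, h1, h2]), keep false 0 (by simp [bMatches, h1, h2]),
              keep false 1 (by simp [bMatches, h1, h2, hip]), happ, hlen] at this
          rw [List.countP_append] at this
          simp only [List.countP_cons, List.countP_nil, hm] at this
          push_cast at this ⊢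
          exact this
      · -- team neither 0 nor 1: both loops skip, all four counts unchanged
        rw [if_neg (by simp [ht0]), if_neg (by simp [ht1]), if_neg (by simp [ht0]),
            if_neg (by simp [ht1]), if_neg (by simp [ht0, ht1])]
        have := ih (done ++ [pb]) m hrest
        rw [keep true 0 (by simp [bMatches, h2, ht0]), keep true 1 (by simp [bMatches, h2, ht1]),
            keep false 0 (by simp [bMatches, h2, ht0]), keep false 1 (by simp [bMatches, h2, ht1]),
            happ, hlen] at this
        exact this

-- ===== VERDICT (by name: the statement is the Claim_ definition above) =====
theorem add_picks_bans_data_spec : Claim_equal_add_picks_bans_data := by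
  intro match_ picks_bans _ hpre
  unfold Spec_add_picks_bans_data add_picks_bans_data add_picks_bans_data_alt
  cases picks_bans with
  | none => dsimp only; rw [guard_eq]
  | some pbs =>
    dsimp only
    by_cases h : pbs.length < 24
    · rw [if_pos h, if_pos h, guard_eq]
    · rw [if_neg h, if_neg h]
      have hkeys : ∀ pb ∈ pbs, (pbGet pb "is_pick").isSome = true ∧ (pbGet pb "team").isSome = true := by
        rcases hpre with hlt | hk
        · exact absurd (by simpa using hlt) h
        · exact fun pb hpb => ⟨(hk pb (by simpa using hpb)).1, (hk pb (by simpa using hpb)).2.1⟩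
      have := loop_eq pbs [] (PySem.Dict.mk match_) hkeys
      simp only [List.countP_nil, Nat.cast_zero, List.nil_append, List.length_nil] at this
      rw [this]
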